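-- pv_equiv track=rewrite | github.com/anton-pershin/slam-datagen | tests/test_merge_quality_dataset.py | _coalesce_markdown_rows
-- ===== SOURCE A (Python) =====
-- def _coalesce_markdown_rows(lines: list[str]) -> list[str]:
--     rows: list[str] = []
--     current: list[str] = []
--     for line in lines:
--         if line.lstrip().startswith("|"):
--             if current:
--                 rows.append("\n".join(current))
--             current = [line]
--         elif current:
--             current.append(line)
--     if current:
--         rows.append("\n".join(current))
--     return rows
-- ===== SOURCE B (Python) =====
-- def _coalesce_markdown_rows(lines: list[str]) -> list[str]:
--     starts = [i for i, line in enumerate(lines) if line.lstrip().startswith("|")]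
--     bounds = starts + [len(lines)]
--     return ["\n".join(lines[s:e]) for s, e in zip(starts, bounds[1:])]
-- ===== Notes on version B (the rewrite author's own statement) =====
-- stated objective: alternative
-- what changed: Replaces the single-pass rows/current accumulator with a two-phase boundary-index construction: first collect the indices of lines starting (after lstrip) with '|', then slice each segment between consecutive boundaries (last one to the end) and join it.
import Mathlib
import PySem

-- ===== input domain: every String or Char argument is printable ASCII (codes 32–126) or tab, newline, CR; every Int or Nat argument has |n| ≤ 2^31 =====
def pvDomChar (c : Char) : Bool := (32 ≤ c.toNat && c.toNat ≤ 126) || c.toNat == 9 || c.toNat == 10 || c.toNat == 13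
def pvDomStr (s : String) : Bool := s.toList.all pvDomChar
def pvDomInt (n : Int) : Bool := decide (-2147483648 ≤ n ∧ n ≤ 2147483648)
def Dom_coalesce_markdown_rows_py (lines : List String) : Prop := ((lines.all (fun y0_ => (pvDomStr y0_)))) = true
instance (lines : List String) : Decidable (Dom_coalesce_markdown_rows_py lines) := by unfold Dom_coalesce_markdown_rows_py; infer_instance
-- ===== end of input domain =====

-- B replaces A's rows/current accumulator by boundary-index collection followed by slicing (alternative decomposition, same cost).

-- ===== PORT A =====
-- shared helper: line.lstrip().startswith("|")
def isRowB (s : String) : Bool := PySem.Str.startswith (PySem.Str.lstrip s) "|"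

def coalesce_markdown_rows_py (lines : List String) : List String :=
  let res := lines.foldl (fun (acc : List String × List String) line =>
    if isRowB line then
      ((if acc.2 ≠ [] then acc.1 ++ [PySem.Str.join "\n" acc.2] else acc.1), [line])
    else if acc.2 ≠ [] then (acc.1, acc.2 ++ [line])
    else acc) ([], [])
  if res.2 ≠ [] then res.1 ++ [PySem.Str.join "\n" res.2] else res.1

-- ===== PORT B =====
def coalesce_markdown_rows_py_alt (lines : List String) : List String :=
  let starts : List Int := ((PySem.List.enumerate lines).filter (fun p => isRowB p.2)).map Prod.fst
  let bounds : List Int := starts ++ [(lines.length : Int)]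
  (starts.zip (bounds.drop 1)).map
    (fun p => PySem.Str.join "\n" (PySem.List.slice lines (some p.1) (some p.2)))

-- ===== PRECONDITION & SPEC =====
def Spec_coalesce_markdown_rows_py (lines : List String) (out : List String) : Prop := out = coalesce_markdown_rows_py_alt lines
instance (lines : List String) (out : List String) : Decidable (Spec_coalesce_markdown_rows_py lines out) := by unfold Spec_coalesce_markdown_rows_py; infer_instance

-- ===== CLAIM (what is proved, stated in full; the proofs are below) =====
def Claim_equal_coalesce_markdown_rows_py : Prop := ∀ (lines : List String), Dom_coalesce_markdown_rows_py lines → Spec_coalesce_markdown_rows_py lines (coalesce_markdown_rows_py lines)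

-- ===== LEMMAS AND PROOFS =====

-- A's fold step
def stepA (acc : List String × List String) (line : String) : List String × List String :=
  if isRowB line then
    ((if acc.2 ≠ [] then acc.1 ++ [PySem.Str.join "\n" acc.2] else acc.1), [line])
  else if acc.2 ≠ [] then (acc.1, acc.2 ++ [line])
  else acc

def finalizeA (res : List String × List String) : List String :=
  if res.2 ≠ [] then res.1 ++ [PySem.Str.join "\n" res.2] else res.1

-- reference segmentation: segRec processes the rest while a segment cur is open
def segRec (cur : List String) : List String → List String
  | [] => [PySem.Str.join "\n" cur]
  | x :: xs =>
    if isRowB x then PySem.Str.join "\n" cur :: segRec [x] xs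
    else segRec (cur ++ [x]) xs

def topRec : List String → List String
  | [] => []
  | x :: xs => if isRowB x then segRec [x] xs else topRec xs

theorem A_eq_def : coalesce_markdown_rows_py = fun lines => finalizeA (lines.foldl stepA ([], [])) := rfl

theorem A_seg (xs : List String) : ∀ (rows cur : List String), cur ≠ [] →
    finalizeA (xs.foldl stepA (rows, cur)) = rows ++ segRec cur xs := by
  induction xs with
  | nil => intro rows cur h; simp [finalizeA, segRec, h]
  | cons x xs ih =>
    intro rows cur h
    by_cases hx : isRowB x = true
    · have hstep : stepA (rows, cur) x = (rows ++ [PySem.Str.join "\n" cur], [x]) := by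
        simp [stepA, hx, h]
      rw [List.foldl_cons, hstep, ih _ [x] (by simp)]
      simp [segRec, hx]
    · have hstep : stepA (rows, cur) x = (rows, cur ++ [x]) := by
        simp [stepA, hx, h]
      rw [List.foldl_cons, hstep, ih _ (cur ++ [x]) (by simp)]
      simp [segRec, hx]

theorem A_top (xs : List String) : ∀ rows : List String,
    finalizeA (xs.foldl stepA (rows, [])) = rows ++ topRec xs := by
  induction xs with
  | nil => intro rows; simp [finalizeA, topRec]
  | cons x xs ih =>
    intro rows
    by_cases hx : isRowB x = true
    · have hstep : stepA (rows, []) x = (rows, [x]) := by simp [stepA, hx]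
      rw [List.foldl_cons, hstep, A_seg xs rows [x] (by simp)]
      simp [topRec, hx]
    · have hstep : stepA (rows, []) x = (rows, []) := by simp [stepA, hx]
      rw [List.foldl_cons, hstep, ih rows]
      simp [topRec, hx]

-- boundary indices collected from position s
def startsFrom (xs : List String) (s : Int) : List Int :=
  ((PySem.List.enumerate xs s).filter (fun p => isRowB p.2)).map Prod.fst

theorem startsFrom_nil (s : Int) : startsFrom [] s = [] := rfl

theorem startsFrom_cons (x : String) (xs : List String) (s : Int) :
    startsFrom (x :: xs) s =
      if isRowB x then s :: startsFrom xs (s + 1) else startsFrom xs (s + 1) := by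
  simp [startsFrom, PySem.List.enumerate_cons]
  split_ifs <;> simp_all

theorem B_seg (xs : List String) : ∀ (pre cur : List String), cur ≠ [] →
    List.map
      (fun p => PySem.Str.join "\n" (PySem.List.slice (pre ++ cur ++ xs) (some p.1) (some p.2)))
      (List.zip ((pre.length : Int) :: startsFrom xs ((pre.length : Int) + (cur.length : Int)))
        (startsFrom xs ((pre.length : Int) + (cur.length : Int)) ++
          [((pre ++ cur ++ xs).length : Int)]))
    = segRec cur xs := by
  induction xs with
  | nil =>
    intro pre cur h
    simp only [startsFrom_nil, List.nil_append, List.append_nil, List.zip_cons_cons,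
      List.zip_nil_right, List.map_cons, List.map_nil, List.length_append, Nat.cast_add]
    rw [PySem.List.slice_natCast_add]
    simp [segRec]
  | cons x xs ih =>
    intro pre cur h
    rw [startsFrom_cons]
    by_cases hx : isRowB x = true
    · rw [if_pos hx]
      have e3 : ((pre.length : Int) + (cur.length : Int)) + 1
          = (((pre ++ cur).length : Nat) : Int) + ((([x] : List String).length : Nat) : Int) := by
        simp
      have hpc : ((pre.length : Int) + (cur.length : Int)) = (((pre ++ cur).length : Nat) : Int) := by
        simp
      have := ih (pre ++ cur) [x] (by simp)
      rw [show ((pre ++ cur) ++ [x] ++ xs = pre ++ cur ++ x :: xs) from by simp] at this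
      rw [← e3] at this
      simp only [List.cons_append, List.zip_cons_cons, List.map_cons]
      rw [segRec, if_pos hx]
      congr 1
      · -- head: slice from pre.length to pre.length + cur.length is cur
        rw [PySem.List.slice_natCast_add]
        congr 1
        rw [show (pre ++ cur ++ x :: xs = pre ++ (cur ++ x :: xs)) from by simp,
          List.drop_left' rfl, List.take_left' rfl]
      · rw [hpc] at this ⊢
        exact this
    · rw [if_neg hx]
      have := ih pre (cur ++ [x]) (by simp)
      have e3 : ((pre.length : Int) + (cur.length : Int)) + 1
          = (pre.length : Int) + ((((cur ++ [x]) : List String).length : Nat) : Int) := by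
        simp
        ring
      have e2 : pre ++ (cur ++ [x]) ++ xs = pre ++ cur ++ x :: xs := by simp
      rw [e2] at this
      rw [e3]
      rw [this]
      rw [segRec, if_neg hx]

theorem B_top (xs : List String) : ∀ pre : List String,
    List.map
      (fun p => PySem.Str.join "\n" (PySem.List.slice (pre ++ xs) (some p.1) (some p.2)))
      (List.zip (startsFrom xs (pre.length : Int))
        ((startsFrom xs (pre.length : Int) ++ [((pre ++ xs).length : Int)]).drop 1))
    = topRec xs := by
  induction xs with
  | nil => intro pre; simp [startsFrom_nil, topRec]
  | cons x xs ih =>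
    intro pre
    rw [startsFrom_cons]
    by_cases hx : isRowB x = true
    · rw [if_pos hx]
      simp only [List.cons_append, List.drop_succ_cons, List.drop_zero]
      have := B_seg xs pre [x] (by simp)
      simp only [List.length_cons, List.length_nil, Nat.cast_one] at this
      rw [show (pre ++ [x] ++ xs = pre ++ x :: xs) from by simp] at this
      rw [topRec, if_pos hx, ← this]
      norm_num
    · rw [if_neg hx]
      have := ih (pre ++ [x])
      rw [show ((pre ++ [x]) ++ xs = pre ++ x :: xs) from by simp] at this
      rw [show ((((pre ++ [x]).length : Nat) : Int) = (pre.length : Int) + 1) from by simp] at this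
      rw [topRec, if_neg hx, ← this]

-- ===== VERDICT (by name: the statement is the Claim_ definition above) =====
theorem coalesce_markdown_rows_py_spec : Claim_equal_coalesce_markdown_rows_py := by
  intro lines _
  unfold Spec_coalesce_markdown_rows_py
  rw [A_eq_def]
  show finalizeA (lines.foldl stepA ([], [])) = _
  rw [A_top lines []]
  have h0 := B_top lines []
  simp only [List.nil_append, List.length_nil, Nat.cast_zero] at h0
  rw [List.nil_append, ← h0]
  rfl
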